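-- pv_equiv track=rewrite | github.com/XinweiChai/leetcode_problems | interviews/MS2/p2.py | minGroup
-- ===== SOURCE A (Python) =====
-- from typing import List
--
-- def minGroup(ls: List[str]) -> int:
--     def similar(s1, s2):
--         if s1 == s2:
--             return True
--         if len(s1) != len(s2):
--             return False
--         pair = None
--         flag = True
--         for i in range(len(s1)):
--             if s1[i] != s2[i]:
--                 if not pair:
--                     pair = (s1[i], s2[i])
--                 elif flag:
--                     flag = False
--                     if (s2[i], s1[i]) != pair:
--                         return False
--                 else:
--                     return False
--         return True
--
--     d = {}
--     cnt = 0
--     for i in range(len(ls)):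
--         if i not in d:
--             cnt += 1
--             d[i] = cnt
--         for j in range(i + 1, len(ls)):
--             if similar(ls[i], ls[j]):
--                 d[j] = cnt
--     return cnt
-- ===== SOURCE B (Python) =====
-- from typing import List
--
-- def minGroup(ls: List[str]) -> int:
--     # Hash-based: a string counts iff none of its "similar" variants was seen before.
--     # similar(p, s) (as specified) holds iff p == s, or p and s have equal length and
--     # differ in exactly one position, or in exactly two positions that are swapped.
--     seen = set()            # strings seen so far
--     wild = set()            # (k, s[:k] + s[k+1:]) signatures of seen strings
--     cnt = 0
--     for s in ls:
--         if not _hasSimilar(s, seen, wild):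
--             cnt += 1
--         seen.add(s)
--         for k in range(len(s)):
--             wild.add((k, s[:k] + s[k + 1:]))
--     return cnt
--
-- def _hasSimilar(s, seen, wild):
--     n = len(s)
--     if s in seen:
--         return True
--     if any((k, s[:k] + s[k + 1:]) in wild for k in range(n)):
--         return True
--     return any(
--         s[i] != s[j] and (s[:i] + s[j] + s[i + 1:j] + s[i] + s[j + 1:]) in seen
--         for i in range(n) for j in range(i + 1, n)
--     )
-- ===== Notes on version B (the rewrite author's own statement) =====
-- stated objective: faster
-- what changed: A compares every string against all later strings with a per-pair character state machine (marking a dict of indices); B makes one pass keeping a hash set of seen strings and a hash set of their one-hole signatures, and tests each string by membership of itself, its one-hole signatures and its pairwise-swap variants, so the inner scan over all other strings disappears.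
import Mathlib
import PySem

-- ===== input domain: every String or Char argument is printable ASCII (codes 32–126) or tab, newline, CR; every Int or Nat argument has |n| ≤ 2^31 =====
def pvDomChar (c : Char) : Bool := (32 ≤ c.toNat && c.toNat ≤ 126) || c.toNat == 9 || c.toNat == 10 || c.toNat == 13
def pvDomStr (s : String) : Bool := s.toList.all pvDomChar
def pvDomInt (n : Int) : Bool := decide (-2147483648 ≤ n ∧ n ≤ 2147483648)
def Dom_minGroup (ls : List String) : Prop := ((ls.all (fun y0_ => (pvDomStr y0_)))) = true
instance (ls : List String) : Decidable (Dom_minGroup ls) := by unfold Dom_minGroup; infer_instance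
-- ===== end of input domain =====

-- B replaces A's all-pairs scan by hash sets of seen strings and their one-hole
-- signatures, testing each string's swap variants against them (measured faster).

-- ===== PORT A =====
-- inner loop of A's `similar`, walking the two strings position by position
-- with the state (pair, flag); the two `return False`s become value `false`.
def simGo : List (Char × Char) → Option (Char × Char) → Bool → Bool
  | [], _, _ => true
  | (c1, c2) :: rest, pair, flag =>
    if c1 ≠ c2 then
      match pair with
      | none => simGo rest (some (c1, c2)) flag
      | some p =>
        if flag then
          if (c2, c1) ≠ p then false else simGo rest (some p) false
        else false
    else simGo rest pair flag

-- A's `similar` on the character lists (s1[i], s2[i] over equal lengths = zip)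
def simC (cs1 cs2 : List Char) : Bool :=
  if cs1 == cs2 then true
  else if cs1.length ≠ cs2.length then false
  else simGo (cs1.zip cs2) none true

def similarA (s1 s2 : String) : Bool := simC s1.toList s2.toList

-- one iteration of A's outer loop (the body of `for i in range(len(ls))`)
def stepA (ls : List String) (st : PySem.Dict Int Int × Int) (i : Int) :
    PySem.Dict Int Int × Int :=
  let d := st.1
  let cnt := st.2
  let st1 : PySem.Dict Int Int × Int :=
    if (d.get? i).isSome then (d, cnt) else (d.insert i (cnt + 1), cnt + 1)
  let d1 := st1.1
  let cnt1 := st1.2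
  let d2 := (PySem.List.pyRange (i + 1) (PySem.List.len ls) 1).foldl
    (fun d j =>
      if similarA (PySem.List.pyGetD ls i "") (PySem.List.pyGetD ls j "") then
        d.insert j cnt1
      else d) d1
  (d2, cnt1)

def minGroup (ls : List String) : Int :=
  ((PySem.List.pyRange 0 (PySem.List.len ls) 1).foldl (stepA ls) (PySem.Dict.empty, 0)).2

-- ===== PORT B =====
-- one-hole signature (k, s[:k] + s[k+1:]) of Source B
def sigOf (cs : List Char) (k : Int) : Int × List Char :=
  (k, PySem.List.slice cs none (some k) ++ PySem.List.slice cs (some (k + 1)) none)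

-- swap variant s[:i] + s[j] + s[i+1:j] + s[i] + s[j+1:] of Source B
def swapOf (cs : List Char) (i j : Int) : List Char :=
  PySem.List.slice cs none (some i) ++ [PySem.List.pyGetD cs j ' ']
    ++ PySem.List.slice cs (some (i + 1)) (some j) ++ [PySem.List.pyGetD cs i ' ']
    ++ PySem.List.slice cs (some (j + 1)) none

-- Source B's _hasSimilar
def hasSimilar (cs : List Char) (seen : PySem.Set (List Char))
    (wild : PySem.Set (Int × List Char)) : Bool :=
  if PySem.Set.contains seen cs then true
  else if (PySem.List.pyRange 0 (PySem.List.len cs) 1).any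
      (fun k => PySem.Set.contains wild (sigOf cs k)) then true
  else (PySem.List.pyRange 0 (PySem.List.len cs) 1).any (fun i =>
    (PySem.List.pyRange (i + 1) (PySem.List.len cs) 1).any (fun j =>
      !(PySem.List.pyGetD cs i ' ' == PySem.List.pyGetD cs j ' ')
        && PySem.Set.contains seen (swapOf cs i j)))

-- one iteration of B's loop (the body of `for s in ls`)
def stepB (st : PySem.Set (List Char) × PySem.Set (Int × List Char) × Int) (s : String) :
    PySem.Set (List Char) × PySem.Set (Int × List Char) × Int :=
  let seen := st.1
  let wild := st.2.1
  let cnt := st.2.2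
  let cs := s.toList
  let cnt1 := if hasSimilar cs seen wild then cnt else cnt + 1
  let seen1 := PySem.Set.add seen cs
  let wild1 := (PySem.List.pyRange 0 (PySem.List.len cs) 1).foldl
    (fun w k => PySem.Set.add w (sigOf cs k)) wild
  (seen1, wild1, cnt1)

def minGroup_alt (ls : List String) : Int :=
  (ls.foldl stepB (PySem.Set.empty, PySem.Set.empty, 0)).2.2

-- ===== PRECONDITION & SPEC =====
def Spec_minGroup (ls : List String) (out : Int) : Prop := out = minGroup_alt ls
instance (ls : List String) (out : Int) : Decidable (Spec_minGroup ls out) := by unfold Spec_minGroup; infer_instance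

-- ===== CLAIM (what is proved, stated in full; the proofs are below) =====
def Claim_equal_minGroup : Prop := ∀ (ls : List String), Dom_minGroup ls → Spec_minGroup ls (minGroup ls)

-- ===== LEMMAS AND PROOFS =====

-- ---- proof-only definitions ----

-- mismatch pairs of the zipped walk
def mp (z : List (Char × Char)) : List (Char × Char) := z.filter (fun q => q.1 != q.2)

-- one-hole signature / swap variant, Nat-indexed (proof-side forms)
def sigL (cs : List Char) (k : Nat) : List Char := cs.take k ++ cs.drop (k + 1)
def swapL (cs : List Char) (i j : Nat) : List Char :=
  (cs.set i (cs.getD j ' ')).set j (cs.getD i ' ')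

-- the similarity relation, positionally
def SimP (p s : List Char) : Prop :=
  p = s ∨ (∃ k : Nat, k < s.length ∧ k < p.length ∧ sigL p k = sigL s k)
    ∨ (∃ i j : Nat, i < j ∧ j < s.length ∧ s.getD i ' ' ≠ s.getD j ' ' ∧ p = swapL s i j)

-- the shared reference computation: count strings with no earlier similar one
def refGo (prev rest : List (List Char)) (cnt : Int) : Int :=
  match rest with
  | [] => cnt
  | s :: r => refGo (prev ++ [s]) r (if prev.any (fun p => simC p s) then cnt else cnt + 1)

-- ---- mp basics ----

theorem mp_cons (a b : Char) (z : List (Char × Char)) :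
    mp ((a, b) :: z) = if a = b then mp z else (a, b) :: mp z := by
  by_cases h : a = b <;> simp [mp, h]

theorem mp_nil_iff (p s : List Char) (h : p.length = s.length) :
    mp (p.zip s) = [] ↔ p = s := by
  induction p generalizing s with
  | nil => cases s with
    | nil => simp [mp]
    | cons b s' => simp at h
  | cons a p' ih =>
    cases s with
    | nil => simp at h
    | cons b s' =>
      simp only [List.length_cons, Nat.add_right_cancel_iff] at h
      rw [List.zip_cons_cons, mp_cons]
      by_cases hab : a = b
      · simp [hab, ih s' h]
      · simp [hab]

theorem mp_self (s : List Char) : mp (s.zip s) = [] := (mp_nil_iff s s rfl).mpr rfl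

-- ---- simGo via mp ----

theorem simGo_some_false (z : List (Char × Char)) (q : Char × Char) :
    simGo z (some q) false = true ↔ mp z = [] := by
  induction z generalizing q with
  | nil => simp [simGo, mp]
  | cons x z' ih =>
    obtain ⟨a, b⟩ := x
    rw [mp_cons]
    by_cases hab : a = b
    · simpa [simGo, hab] using ih q
    · simp [simGo, hab]

theorem simGo_some_true (z : List (Char × Char)) (q : Char × Char) :
    simGo z (some q) true = true ↔
      mp z = [] ∨ ∃ c d, mp z = [(c, d)] ∧ (d, c) = q := by
  induction z generalizing q with
  | nil => simp [simGo, mp]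
  | cons x z' ih =>
    obtain ⟨a, b⟩ := x
    by_cases hab : a = b
    · rw [mp_cons, if_pos hab]
      have hred : simGo ((a, b) :: z') (some q) true = simGo z' (some q) true := by
        simp [simGo, hab]
      rw [hred]; exact ih q
    · rw [mp_cons, if_neg hab]
      have hred : simGo ((a, b) :: z') (some q) true =
          if (b, a) = q then simGo z' (some q) false else false := by
        simp [simGo, hab]
      rw [hred]
      by_cases hq : (b, a) = q
      · rw [if_pos hq, simGo_some_false]
        constructor
        · intro h; exact Or.inr ⟨a, b, by simp [h], hq⟩
        · rintro (h | ⟨c, d, hcd, hdc⟩)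
          · simp at h
          · simp only [List.cons.injEq, Prod.mk.injEq] at hcd
            obtain ⟨⟨rfl, rfl⟩, h2⟩ := hcd
            exact h2
      · rw [if_neg hq]
        constructor
        · intro h; simp at h
        · rintro (h | ⟨c, d, hcd, hdc⟩)
          · simp at h
          · simp only [List.cons.injEq, Prod.mk.injEq] at hcd
            obtain ⟨⟨rfl, rfl⟩, -⟩ := hcd
            exact absurd hdc hq

theorem simGo_none_true (z : List (Char × Char)) :
    simGo z none true = true ↔
      mp z = [] ∨ (∃ x, mp z = [x]) ∨ ∃ a b c d, mp z = [(a, b), (c, d)] ∧ (d, c) = (a, b) := by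
  induction z with
  | nil => simp [simGo, mp]
  | cons x z' ih =>
    obtain ⟨a, b⟩ := x
    by_cases hab : a = b
    · rw [mp_cons, if_pos hab]
      have hred : simGo ((a, b) :: z') none true = simGo z' none true := by
        simp [simGo, hab]
      rw [hred]; exact ih
    · rw [mp_cons, if_neg hab]
      have hred : simGo ((a, b) :: z') none true = simGo z' (some (a, b)) true := by
        simp [simGo, hab]
      rw [hred, simGo_some_true]
      constructor
      · rintro (h | ⟨c, d, hcd, hdc⟩)
        · exact Or.inr (Or.inl ⟨(a, b), by simp [h]⟩)
        · exact Or.inr (Or.inr ⟨a, b, c, d, by simp [hcd], hdc⟩)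
      · rintro (h | ⟨y, hy⟩ | ⟨a', b', c, d, hcd, hdc⟩)
        · simp at h
        · simp only [List.cons.injEq] at hy
          exact Or.inl hy.2
        · simp only [List.cons.injEq, Prod.mk.injEq] at hcd
          obtain ⟨⟨rfl, rfl⟩, h2⟩ := hcd
          exact Or.inr ⟨c, d, h2, hdc⟩

theorem mem_mp_ne (z : List (Char × Char)) (x : Char × Char) (h : x ∈ mp z) : x.1 ≠ x.2 := by
  have := List.of_mem_filter h
  simpa using this

-- ---- positional characterisations ----

theorem one_diff_of_mp (p s : List Char) (h : p.length = s.length)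
    (hm : (mp (p.zip s)).length ≤ 1) :
    p = s ∨ ∃ k : Nat, k < s.length ∧ k < p.length ∧ sigL p k = sigL s k := by
  induction p generalizing s with
  | nil =>
    cases s with
    | nil => exact Or.inl rfl
    | cons b s' => simp at h
  | cons a p' ih =>
    cases s with
    | nil => simp at h
    | cons b s' =>
      simp only [List.length_cons, Nat.add_right_cancel_iff] at h
      rw [List.zip_cons_cons, mp_cons] at hm
      by_cases hab : a = b
      · rw [if_pos hab] at hm
        rcases ih s' h hm with heq | ⟨k, hk1, hk2, hsig⟩
        · exact Or.inl (by rw [hab, heq])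
        · refine Or.inr ⟨k + 1, by simpa using hk1, by simpa using hk2, ?_⟩
          simp only [sigL, List.take_succ_cons, List.drop_succ_cons] at hsig ⊢
          simp [hab, hsig]
      · rw [if_neg hab] at hm
        have h0 : (mp (p'.zip s')).length = 0 := by
          simp only [List.length_cons] at hm; omega
        have hps : p' = s' := (mp_nil_iff p' s' h).mp (List.length_eq_zero_iff.mp h0)
        refine Or.inr ⟨0, by simp, by simp, ?_⟩
        simp [sigL, hps]

theorem mp_of_one_diff (p s : List Char) (k : Nat) (hp : k < p.length) (hs : k < s.length)
    (h : sigL p k = sigL s k) : p.length = s.length ∧ (mp (p.zip s)).length ≤ 1 := by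
  induction k generalizing p s with
  | zero =>
    cases p with
    | nil => simp at hp
    | cons a p' =>
      cases s with
      | nil => simp at hs
      | cons b s' =>
        simp only [sigL, List.take_zero, List.drop_succ_cons, List.drop_zero,
          List.nil_append] at h
        subst h
        rw [List.zip_cons_cons, mp_cons]
        constructor
        · simp
        · by_cases hab : a = b
          · simp [hab, mp_self]
          · simp [hab, mp_self]
  | succ k ih =>
    cases p with
    | nil => simp at hp
    | cons a p' =>
      cases s with
      | nil => simp at hs
      | cons b s' =>
        simp only [sigL, List.take_succ_cons, List.drop_succ_cons, List.cons_append,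
          List.cons.injEq] at h
        obtain ⟨rfl, hsig⟩ := h
        obtain ⟨hlen, hmp⟩ := ih p' s' (by simpa using hp) (by simpa using hs) hsig
        rw [List.zip_cons_cons, mp_cons, if_pos rfl]
        exact ⟨by simpa using hlen, hmp⟩

theorem single_diff_set (p s : List Char) (c d : Char) (h : p.length = s.length)
    (hm : mp (p.zip s) = [(c, d)]) :
    ∃ j : Nat, j < s.length ∧ s.getD j ' ' = d ∧ p = s.set j c := by
  induction p generalizing s with
  | nil =>
    cases s with
    | nil => simp [mp] at hm
    | cons b s' => simp at h
  | cons a p' ih =>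
    cases s with
    | nil => simp at h
    | cons b s' =>
      simp only [List.length_cons, Nat.add_right_cancel_iff] at h
      rw [List.zip_cons_cons, mp_cons] at hm
      by_cases hab : a = b
      · rw [if_pos hab] at hm
        obtain ⟨j, hj, hd, hset⟩ := ih s' h hm
        exact ⟨j + 1, by simpa using hj, by simpa using hd, by simp [hab, hset]⟩
      · rw [if_neg hab] at hm
        simp only [List.cons.injEq, Prod.mk.injEq] at hm
        obtain ⟨⟨rfl, rfl⟩, hnil⟩ := hm
        have hps : p' = s' := (mp_nil_iff p' s' h).mp hnil
        exact ⟨0, by simp, by simp, by simp [hps]⟩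

theorem mp_set_zip (s : List Char) (j : Nat) (c : Char) (hj : j < s.length) :
    mp ((s.set j c).zip s) = if c = s.getD j ' ' then [] else [(c, s.getD j ' ')] := by
  induction s generalizing j with
  | nil => simp at hj
  | cons b s' ih =>
    cases j with
    | zero =>
      simp only [List.set_cons_zero, List.zip_cons_cons, mp_cons, List.getD_cons_zero]
      by_cases hcb : c = b
      · simp [hcb, mp_self]
      · simp [hcb, mp_self]
    | succ j' =>
      simp only [List.set_cons_succ, List.zip_cons_cons, mp_cons,
        List.getD_cons_succ]
      exact ih j' (by simpa using hj)

theorem swap_of_mp (p s : List Char) (a b : Char) (h : p.length = s.length)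
    (hm : mp (p.zip s) = [(a, b), (b, a)]) :
    ∃ i j : Nat, i < j ∧ j < s.length ∧ s.getD i ' ' ≠ s.getD j ' ' ∧ p = swapL s i j := by
  induction p generalizing s with
  | nil =>
    cases s with
    | nil => simp [mp] at hm
    | cons b0 s' => simp at h
  | cons a0 p' ih =>
    cases s with
    | nil => simp at h
    | cons b0 s' =>
      simp only [List.length_cons, Nat.add_right_cancel_iff] at h
      have hab : a ≠ b := by
        have := mem_mp_ne (((a0 :: p').zip (b0 :: s'))) (a, b) (by rw [hm]; simp)
        simpa using this
      rw [List.zip_cons_cons, mp_cons] at hm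
      by_cases hab0 : a0 = b0
      · rw [if_pos hab0] at hm
        obtain ⟨i, j, hij, hj, hne, hp'⟩ := ih s' h hm
        refine ⟨i + 1, j + 1, by omega, by simpa using hj, by simpa using hne, ?_⟩
        simp [swapL, hab0, hp']
      · rw [if_neg hab0] at hm
        simp only [List.cons.injEq, Prod.mk.injEq] at hm
        obtain ⟨⟨ha, hb⟩, hm'⟩ := hm
        subst ha; subst hb
        obtain ⟨j', hj', hgd, hset⟩ := single_diff_set p' s' b0 a0 h hm'
        refine ⟨0, j' + 1, by omega, by simpa using hj', ?_, ?_⟩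
        · simp only [List.getD_cons_zero, List.getD_cons_succ, hgd]
          exact fun hh => hab (by simp [hh])
        · simp only [swapL, List.set_cons_zero, List.getD_cons_succ, List.getD_cons_zero,
            List.set_cons_succ]
          rw [hgd, hset]

theorem swapL_length (s : List Char) (i j : Nat) : (swapL s i j).length = s.length := by
  simp [swapL]

theorem mp_of_swap (s : List Char) (i j : Nat) (hij : i < j) (hj : j < s.length)
    (hne : s.getD i ' ' ≠ s.getD j ' ') :
    (swapL s i j).length = s.length ∧
      mp ((swapL s i j).zip s) = [(s.getD j ' ', s.getD i ' '), (s.getD i ' ', s.getD j ' ')] := by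
  refine ⟨swapL_length s i j, ?_⟩
  induction s generalizing i j with
  | nil => simp at hj
  | cons b s' ih =>
    cases i with
    | zero =>
      obtain ⟨j', rfl⟩ : ∃ j', j = j' + 1 := ⟨j - 1, by omega⟩
      simp only [List.getD_cons_zero, List.getD_cons_succ] at hne ⊢
      have hj' : j' < s'.length := by simpa using hj
      have hswap : swapL (b :: s') 0 (j' + 1) = s'.getD j' ' ' :: s'.set j' b := by
        simp [swapL]
      rw [hswap, List.zip_cons_cons, mp_cons, if_neg (by exact fun h => hne h.symm)]
      rw [mp_set_zip s' j' b hj', if_neg (by exact fun h => hne h)]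
    | succ i' =>
      obtain ⟨j', rfl⟩ : ∃ j', j = j' + 1 := ⟨j - 1, by omega⟩
      simp only [List.getD_cons_succ] at hne ⊢
      have hswap : swapL (b :: s') (i' + 1) (j' + 1) = b :: swapL s' i' j' := by
        simp [swapL]
      rw [hswap, List.zip_cons_cons, mp_cons, if_pos rfl]
      exact ih i' j' (by omega) (by simpa using hj) hne

-- ---- the characterisation of A's similar ----

theorem simC_iff (p s : List Char) : simC p s = true ↔ SimP p s := by
  unfold simC
  by_cases hps : p = s
  · subst hps
    simp [SimP]
  · rw [if_neg (by simpa using hps)]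
    by_cases hlen : p.length = s.length
    · rw [if_neg (not_not_intro hlen), simGo_none_true]
      constructor
      · rintro (h | ⟨x, hx⟩ | ⟨a, b, c, d, hm, hdc⟩)
        · exact Or.inl ((mp_nil_iff p s hlen).mp h)
        · rcases one_diff_of_mp p s hlen (by rw [hx]; simp) with h1 | h2
          · exact Or.inl h1
          · exact Or.inr (Or.inl h2)
        · simp only [Prod.mk.injEq] at hdc
          obtain ⟨hda, hcb⟩ := hdc
          rw [hda, hcb] at hm
          exact Or.inr (Or.inr (swap_of_mp p s a b hlen hm))
      · rintro (rfl | ⟨k, hk1, hk2, hsig⟩ | ⟨i, j, hij, hj, hne, rfl⟩)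
        · exact Or.inl (mp_self _)
        · have hle := (mp_of_one_diff p s k hk2 hk1 hsig).2
          obtain h0 | ⟨y, hy⟩ : mp (p.zip s) = [] ∨ ∃ y, mp (p.zip s) = [y] := by
            cases hmp : mp (p.zip s) with
            | nil => exact Or.inl rfl
            | cons y t =>
              rw [hmp] at hle
              simp only [List.length_cons] at hle
              have ht : t = [] := List.length_eq_zero_iff.mp (by omega)
              exact Or.inr ⟨y, by rw [ht]⟩
          · exact Or.inl h0
          · exact Or.inr (Or.inl ⟨y, hy⟩)
        · obtain ⟨-, hM⟩ := mp_of_swap s i j hij hj hne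
          exact Or.inr (Or.inr ⟨s.getD j ' ', s.getD i ' ', s.getD i ' ', s.getD j ' ', hM, rfl⟩)
    · rw [if_pos hlen]
      constructor
      · intro h; simp at h
      · rintro (rfl | ⟨k, hk1, hk2, hsig⟩ | ⟨i, j, hij, hj, hne, rfl⟩)
        · exact absurd rfl hps
        · exact absurd (mp_of_one_diff p s k hk2 hk1 hsig).1 hlen
        · exact absurd (swapL_length s i j) hlen

-- ---- bridging B's slice-built variants to the positional forms ----

theorem sigOf_natCast (cs : List Char) (k : Nat) : sigOf cs (k : Int) = ((k : Int), sigL cs k) := by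
  have hc : ((k : Int) + 1) = ((k + 1 : Nat) : Int) := by push_cast; ring
  unfold sigOf sigL
  rw [hc, PySem.List.slice_to_natCast, PySem.List.slice_from_natCast]

theorem take_middle_eq_swapL (cs : List Char) (i j : Nat) (hij : i < j) (hj : j < cs.length) :
    cs.take i ++ [cs.getD j ' '] ++ (cs.drop (i + 1)).take (j - (i + 1)) ++ [cs.getD i ' ']
      ++ cs.drop (j + 1) = swapL cs i j := by
  induction cs generalizing i j with
  | nil => simp at hj
  | cons b s' ih =>
    cases i with
    | zero =>
      obtain ⟨j', rfl⟩ : ∃ j', j = j' + 1 := ⟨j - 1, by omega⟩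
      have hj' : j' < s'.length := by simpa using hj
      simp only [List.take_zero, List.getD_cons_succ, List.getD_cons_zero, List.drop_succ_cons,
        List.drop_zero, List.nil_append, Nat.add_sub_cancel, swapL, List.set_cons_zero,
        List.set_cons_succ]
      rw [List.set_eq_take_cons_drop b hj']
      simp
    | succ i' =>
      obtain ⟨j', rfl⟩ : ∃ j', j = j' + 1 := ⟨j - 1, by omega⟩
      have := ih i' j' (by omega) (by simpa using hj)
      simp only [List.take_succ_cons, List.getD_cons_succ, List.drop_succ_cons, swapL,
        List.set_cons_succ] at this ⊢
      simp only [Nat.add_sub_add_right] at this ⊢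
      rw [List.cons_append, List.cons_append, List.cons_append, List.cons_append, this]

theorem swapOf_natCast (cs : List Char) (i j : Nat) (hij : i < j) (hj : j < cs.length) :
    swapOf cs (i : Int) (j : Int) = swapL cs i j := by
  have hci : ((i : Int) + 1) = ((i + 1 : Nat) : Int) := by push_cast; ring
  have hcj : ((j : Int) + 1) = ((j + 1 : Nat) : Int) := by push_cast; ring
  unfold swapOf
  rw [hci, hcj, PySem.List.slice_to_natCast, PySem.List.slice_from_natCast,
    PySem.List.slice_natCast, PySem.List.pyGetD_natCast, PySem.List.pyGetD_natCast]
  rw [← take_middle_eq_swapL cs i j hij hj]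

-- ---- B: hasSimilar answers "is some earlier string similar" ----

theorem hasSimilar_eq (cs : List Char) (pre : List (List Char))
    (seen : PySem.Set (List Char)) (wild : PySem.Set (Int × List Char))
    (hseen : ∀ x, x ∈ seen ↔ x ∈ pre)
    (hwild : ∀ y, y ∈ wild ↔ ∃ p ∈ pre, ∃ k : Nat, k < p.length ∧ y = ((k : Int), sigL p k)) :
    hasSimilar cs seen wild = pre.any (fun p => simC p cs) := by
  have hcontains : ∀ x, PySem.Set.contains seen x = true ↔ x ∈ pre := by
    intro x; rw [PySem.Set.contains_iff]; exact hseen x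
  rw [Bool.eq_iff_iff, List.any_eq_true]
  unfold hasSimilar
  constructor
  · intro h
    split_ifs at h with h1 h2
    · exact ⟨cs, (hcontains cs).mp h1, by rw [simC_iff]; exact Or.inl rfl⟩
    · rw [List.any_eq_true] at h2
      obtain ⟨kI, hkmem, hkw⟩ := h2
      rw [PySem.List.mem_pyRange_one] at hkmem
      simp only [PySem.List.len_eq] at hkmem
      obtain ⟨hk0, hkn⟩ := hkmem
      obtain ⟨k, rfl⟩ : ∃ k : Nat, kI = (k : Int) := ⟨kI.toNat, by omega⟩
      rw [sigOf_natCast] at hkw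
      rw [PySem.Set.contains_iff, hwild] at hkw
      obtain ⟨p, hp, k2, hk2, heq⟩ := hkw
      simp only [Prod.mk.injEq, Int.natCast_inj] at heq
      obtain ⟨rfl, hsig⟩ := heq
      refine ⟨p, hp, ?_⟩
      rw [simC_iff]
      exact Or.inr (Or.inl ⟨k, by exact_mod_cast hkn, hk2, hsig.symm⟩)
    · rw [List.any_eq_true] at h
      obtain ⟨iI, himem, hinner⟩ := h
      rw [List.any_eq_true] at hinner
      obtain ⟨jI, hjmem, hcond⟩ := hinner
      rw [PySem.List.mem_pyRange_one] at himem hjmem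
      simp only [PySem.List.len_eq] at himem hjmem
      obtain ⟨i, rfl⟩ : ∃ i : Nat, iI = (i : Int) := ⟨iI.toNat, by omega⟩
      obtain ⟨j, rfl⟩ : ∃ j : Nat, jI = (j : Int) := ⟨jI.toNat, by omega⟩
      have hij : i < j := by omega
      have hjn : j < cs.length := by omega
      rw [Bool.and_eq_true, PySem.Set.contains_iff, hseen] at hcond
      obtain ⟨hne, hmem⟩ := hcond
      simp only [PySem.List.pyGetD_natCast, Bool.not_eq_eq_eq_not, Bool.not_true, beq_eq_false_iff_ne,
        ne_eq] at hne
      rw [swapOf_natCast cs i j hij hjn] at hmem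
      refine ⟨swapL cs i j, hmem, ?_⟩
      rw [simC_iff]
      exact Or.inr (Or.inr ⟨i, j, hij, hjn, hne, rfl⟩)
  · rintro ⟨p, hp, hsim⟩
    rw [simC_iff] at hsim
    rcases hsim with rfl | ⟨k, hk1, hk2, hsig⟩ | ⟨i, j, hij, hj, hne, rfl⟩
    · rw [if_pos ((hcontains p).mpr hp)]
    · have hany : (PySem.List.pyRange 0 (PySem.List.len cs) 1).any
          (fun kk => PySem.Set.contains wild (sigOf cs kk)) = true := by
        rw [List.any_eq_true]
        refine ⟨(k : Int), ?_, ?_⟩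
        · rw [PySem.List.mem_pyRange_one]
          simp only [PySem.List.len_eq]
          omega
        · rw [sigOf_natCast, PySem.Set.contains_iff, hwild]
          exact ⟨p, hp, k, hk2, by rw [hsig]⟩
      by_cases h1 : PySem.Set.contains seen cs = true
      · rw [if_pos h1]
      · rw [if_neg h1, if_pos hany]
    · have hany : (PySem.List.pyRange 0 (PySem.List.len cs) 1).any (fun iI =>
          (PySem.List.pyRange (iI + 1) (PySem.List.len cs) 1).any (fun jI =>
            !(PySem.List.pyGetD cs iI ' ' == PySem.List.pyGetD cs jI ' ')
              && PySem.Set.contains seen (swapOf cs iI jI))) = true := by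
        rw [List.any_eq_true]
        refine ⟨(i : Int), ?_, ?_⟩
        · rw [PySem.List.mem_pyRange_one]
          simp only [PySem.List.len_eq]
          omega
        · rw [List.any_eq_true]
          refine ⟨(j : Int), ?_, ?_⟩
          · rw [PySem.List.mem_pyRange_one]
            simp only [PySem.List.len_eq]
            omega
          · rw [Bool.and_eq_true, PySem.Set.contains_iff, hseen]
            refine ⟨?_, by rw [swapOf_natCast cs i j hij hj]; exact hp⟩
            simp only [PySem.List.pyGetD_natCast, Bool.not_eq_eq_eq_not, Bool.not_true,
              beq_eq_false_iff_ne, ne_eq]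
            exact hne
      by_cases h1 : PySem.Set.contains seen cs = true
      · rw [if_pos h1]
      · rw [if_neg h1]
        by_cases h2 : ((PySem.List.pyRange 0 (PySem.List.len cs) 1).any
            (fun kk => PySem.Set.contains wild (sigOf cs kk))) = true
        · rw [if_pos h2]
        · rw [if_neg h2]
          exact hany

-- ---- B: the outer fold computes refGo ----

theorem alt_foldl_eq (rest : List String) (pre : List (List Char))
    (seen : PySem.Set (List Char)) (wild : PySem.Set (Int × List Char)) (cnt : Int)
    (hseen : ∀ x, x ∈ seen ↔ x ∈ pre)
    (hwild : ∀ y, y ∈ wild ↔ ∃ p ∈ pre, ∃ k : Nat, k < p.length ∧ y = ((k : Int), sigL p k)) :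
    (rest.foldl stepB (seen, wild, cnt)).2.2 = refGo pre (rest.map String.toList) cnt := by
  induction rest generalizing pre seen wild cnt with
  | nil => simp [refGo]
  | cons s r ih =>
    rw [List.foldl_cons, List.map_cons]
    have hstep : stepB (seen, wild, cnt) s =
        (PySem.Set.add seen s.toList,
         (PySem.List.pyRange 0 (PySem.List.len s.toList) 1).foldl
           (fun w k => PySem.Set.add w (sigOf s.toList k)) wild,
         if hasSimilar s.toList seen wild then cnt else cnt + 1) := rfl
    rw [hstep]
    show _ = refGo (pre ++ [s.toList]) (r.map String.toList)
      (if pre.any (fun p => simC p s.toList) then cnt else cnt + 1)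
    rw [← hasSimilar_eq s.toList pre seen wild hseen hwild]
    apply ih
    · intro x
      rw [PySem.Set.mem_add]
      simp [hseen x]
    · intro y
      rw [PySem.Set.mem_foldl_add]
      constructor
      · rintro (hy | ⟨kI, hkmem, rfl⟩)
        · obtain ⟨p, hp, k, hk, rfl⟩ := (hwild y).mp hy
          exact ⟨p, by simp [hp], k, hk, rfl⟩
        · rw [PySem.List.mem_pyRange_one] at hkmem
          simp only [PySem.List.len_eq] at hkmem
          obtain ⟨k, rfl⟩ : ∃ k : Nat, kI = (k : Int) := ⟨kI.toNat, by omega⟩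
          exact ⟨s.toList, by simp, k, by exact_mod_cast hkmem.2, sigOf_natCast s.toList k⟩
      · rintro ⟨p, hp, k, hk, rfl⟩
        rcases List.mem_append.mp hp with hp' | hp'
        · exact Or.inl ((hwild _).mpr ⟨p, hp', k, hk, rfl⟩)
        · rw [List.mem_singleton] at hp'
          subst hp'
          refine Or.inr ⟨(k : Int), ?_, (sigOf_natCast _ k).symm⟩
          rw [PySem.List.mem_pyRange_one]
          simp only [PySem.List.len_eq]
          omega

theorem minGroup_alt_eq_ref (ls : List String) :
    minGroup_alt ls = refGo [] (ls.map String.toList) 0 := by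
  unfold minGroup_alt
  exact alt_foldl_eq ls [] _ _ 0 (by simp [PySem.Set.empty]) (by simp [PySem.Set.empty])

-- ---- A: dict-key invariant and outer loop ----

def KeyP (csl : List (List Char)) (m : Nat) (x : Int) : Prop :=
  (∃ i : Nat, i < m ∧ x = (i : Int)) ∨
  (∃ i j : Nat, i < m ∧ i < j ∧ j < csl.length ∧ x = (j : Int) ∧
    simC (csl.getD i []) (csl.getD j []) = true)

theorem inner_get?_isSome (r : List Int) (v : Int) (c : Int → Bool) (d : PySem.Dict Int Int) (x : Int) :
    (((r.foldl (fun d j => if c j then d.insert j v else d) d).get? x).isSome = true) ↔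
      ((d.get? x).isSome = true ∨ ∃ j ∈ r, c j = true ∧ x = j) := by
  induction r generalizing d with
  | nil => simp
  | cons j0 r ih =>
    rw [List.foldl_cons]
    by_cases hc : c j0 = true
    · rw [if_pos hc, ih]
      have hins : ∀ y, (((d.insert j0 v).get? y).isSome = true) ↔
          (y = j0 ∨ (d.get? y).isSome = true) := by
        intro y
        rw [PySem.Dict.get?_insert]
        by_cases hy : y = j0 <;> simp [hy]
      rw [hins x]
      simp only [List.mem_cons]
      constructor
      · rintro ((hx0 | h) | ⟨j, hj, hcj, hx⟩)
        · exact Or.inr ⟨j0, Or.inl rfl, hc, hx0⟩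
        · exact Or.inl h
        · exact Or.inr ⟨j, Or.inr hj, hcj, hx⟩
      · rintro (h | ⟨j, (rfl | hj), hcj, hx⟩)
        · exact Or.inl (Or.inr h)
        · exact Or.inl (Or.inl hx)
        · exact Or.inr ⟨j, hj, hcj, hx⟩
    · rw [if_neg hc, ih]
      simp only [List.mem_cons]
      constructor
      · rintro (h | ⟨j, hj, hcj, hx⟩)
        · exact Or.inl h
        · exact Or.inr ⟨j, Or.inr hj, hcj, hx⟩
      · rintro (h | ⟨j, (rfl | hj), hcj, hx⟩)
        · exact Or.inl h
        · exact absurd hcj hc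
        · exact Or.inr ⟨j, hj, hcj, hx⟩

theorem refGo_snoc (prev l : List (List Char)) (s : List Char) (cnt : Int) :
    refGo prev (l ++ [s]) cnt =
      if (prev ++ l).any (fun p => simC p s) then refGo prev l cnt else refGo prev l cnt + 1 := by
  induction l generalizing prev cnt with
  | nil => simp [refGo]
  | cons t l ih =>
    simp only [List.cons_append, refGo]
    rw [ih]
    simp [List.append_assoc]

theorem any_take_iff (l : List (List Char)) (m : Nat) (f : List Char → Bool) :
    ((l.take m).any f = true) ↔ ∃ i, i < m ∧ i < l.length ∧ f (l.getD i []) = true := by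
  rw [List.any_eq_true]
  constructor
  · rintro ⟨p, hp, hf⟩
    obtain ⟨i, hi, hpi⟩ := List.mem_iff_getElem.mp hp
    have hi' : i < m ∧ i < l.length := by
      have := hi
      simp only [List.length_take] at this
      omega
    refine ⟨i, hi'.1, hi'.2, ?_⟩
    rw [List.getD_eq_getElem l [] hi'.2]
    rw [← hpi] at hf
    simpa [List.getElem_take] using hf
  · rintro ⟨i, him, hil, hf⟩
    refine ⟨l.getD i [], ?_, hf⟩
    have hmin : i < (l.take m).length := by simp [List.length_take]; omega
    have : (l.take m)[i] = l[i] := List.getElem_take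
    rw [List.getD_eq_getElem l [] hil, ← this]
    exact List.getElem_mem hmin

theorem toList_getD (ls : List String) (i : Nat) :
    (ls.getD i "").toList = (ls.map String.toList).getD i [] := by
  rcases Nat.lt_or_ge i ls.length with h | h
  · rw [List.getD_eq_getElem _ _ h, List.getD_eq_getElem _ _ (by simpa using h)]
    simp
  · rw [List.getD_eq_default _ _ h, List.getD_eq_default _ _ (by simpa using h)]
    rfl

-- A's similar, applied to the i-th and j-th strings, is simC on the char lists
theorem similarA_getD (ls : List String) (i j : Nat) :
    similarA (PySem.List.pyGetD ls (i : Int) "") (PySem.List.pyGetD ls (j : Int) "") =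
      simC ((ls.map String.toList).getD i []) ((ls.map String.toList).getD j []) := by
  simp only [PySem.List.pyGetD_natCast]
  unfold similarA
  rw [toList_getD, toList_getD]

theorem A_loop_inv (ls : List String) (m : Nat) (hm : m ≤ ls.length) :
    (∀ x : Int,
      (((((List.range m).map (fun k : Nat => (k : Int))).foldl (stepA ls) (PySem.Dict.empty, 0)).1.get? x).isSome = true)
        ↔ KeyP (ls.map String.toList) m x) ∧
    (((List.range m).map (fun k : Nat => (k : Int))).foldl (stepA ls) (PySem.Dict.empty, 0)).2
        = refGo [] ((ls.map String.toList).take m) 0 := by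
  induction m with
  | zero =>
    constructor
    · intro x
      simp [KeyP, PySem.Dict.get?_empty]
    · simp [refGo]
  | succ m ih =>
    obtain ⟨ihK, ihC⟩ := ih (by omega)
    have hmn : m < ls.length := by omega
    set csl := ls.map String.toList with hcsl
    have hcsl_len : csl.length = ls.length := by simp [hcsl]
    rw [List.range_succ, List.map_append, List.foldl_append, List.map_cons, List.map_nil,
      List.foldl_cons, List.foldl_nil]
    set st := ((List.range m).map (fun k : Nat => (k : Int))).foldl (stepA ls) (PySem.Dict.empty, 0) with hst
    obtain ⟨d, cnt⟩ := st
    -- the decision A takes at iteration m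
    have hdec : ((d.get? (m : Int)).isSome = true) ↔
        ((csl.take m).any (fun p => simC p (csl.getD m [])) = true) := by
      rw [ihK (m : Int), any_take_iff]
      constructor
      · rintro ((⟨i, hi, hx⟩) | ⟨i, j, hi, hij, hjn, hx, hsim⟩)
        · exfalso
          have : m = i := by exact_mod_cast hx
          omega
        · have : m = j := by exact_mod_cast hx
          subst this
          exact ⟨i, hij, by omega, hsim⟩
      · rintro ⟨i, him, hil, hsim⟩
        exact Or.inr ⟨i, m, him, him, by omega, rfl, hsim⟩
    -- unfolding one step of A
    have hsplit : stepA ls (d, cnt) (m : Int) =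
        ((PySem.List.pyRange ((m : Int) + 1) (PySem.List.len ls) 1).foldl
          (fun d' j =>
            if similarA (PySem.List.pyGetD ls (m : Int) "") (PySem.List.pyGetD ls j "") then
              d'.insert j ((if (d.get? (m : Int)).isSome then (d, cnt)
                else (d.insert (m : Int) (cnt + 1), cnt + 1)).2)
            else d')
          ((if (d.get? (m : Int)).isSome then (d, cnt)
            else (d.insert (m : Int) (cnt + 1), cnt + 1)).1),
         (if (d.get? (m : Int)).isSome then (d, cnt)
            else (d.insert (m : Int) (cnt + 1), cnt + 1)).2) := rfl
    rw [hsplit]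
    have htake : csl.take (m + 1) = csl.take m ++ [csl.getD m []] := by
      rw [List.getD_eq_getElem _ _ (by omega)]
      rw [List.take_add_one]
      simp [List.getElem?_eq_getElem (by omega : m < csl.length)]
    constructor
    · intro x
      rw [inner_get?_isSome]
      have hd1 : ∀ y : Int,
          ((((if (d.get? (m : Int)).isSome then (d, cnt)
              else (d.insert (m : Int) (cnt + 1), cnt + 1)).1).get? y).isSome = true) ↔
            (y = (m : Int) ∨ (d.get? y).isSome = true) := by
        intro y
        by_cases hmem : (d.get? (m : Int)).isSome = true
        · rw [if_pos hmem]
          constructor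
          · exact fun h => Or.inr h
          · rintro (rfl | h)
            · exact hmem
            · exact h
        · rw [if_neg hmem]
          simp only [PySem.Dict.get?_insert]
          by_cases hy : y = (m : Int) <;> simp [hy]
      rw [hd1 x]
      constructor
      · rintro ((rfl | h) | ⟨j, hjmem, hcj, hx⟩)
        · exact Or.inl ⟨m, by omega, rfl⟩
        · rcases (ihK x).mp h with ⟨i, hi, hx⟩ | ⟨i, j, hi, hij, hjn, hx, hsim⟩
          · exact Or.inl ⟨i, by omega, hx⟩
          · exact Or.inr ⟨i, j, by omega, hij, hjn, hx, hsim⟩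
        · rw [PySem.List.mem_pyRange_one] at hjmem
          simp only [PySem.List.len_eq] at hjmem
          obtain ⟨jN, rfl⟩ : ∃ jN : Nat, j = (jN : Int) := ⟨j.toNat, by omega⟩
          rw [similarA_getD ls m jN] at hcj
          refine Or.inr ⟨m, jN, by omega, by omega, by rw [hcsl_len]; exact_mod_cast hjmem.2, hx, ?_⟩
          rw [← hcsl] at hcj
          exact hcj
      · rintro (⟨i, hi, hx⟩ | ⟨i, j, hi, hij, hjn, hx, hsim⟩)
        · rcases Nat.lt_or_ge i m with him | him
          · exact Or.inl (Or.inr ((ihK x).mpr (Or.inl ⟨i, him, hx⟩)))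
          · have hmi : m = i := by omega
            subst hmi
            exact Or.inl (Or.inl hx)
        · rcases Nat.lt_or_ge i m with him | him
          · exact Or.inl (Or.inr ((ihK x).mpr (Or.inr ⟨i, j, him, hij, hjn, hx, hsim⟩)))
          · have hmi : m = i := by omega
            subst hmi
            refine Or.inr ⟨(j : Int), ?_, ?_, hx⟩
            · rw [PySem.List.mem_pyRange_one]
              simp only [PySem.List.len_eq]
              constructor
              · omega
              · rw [hcsl_len] at hjn
                exact_mod_cast hjn
            · rw [similarA_getD ls m j]
              exact hsim
    · rw [htake, refGo_snoc]
      simp only [List.nil_append]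
      by_cases hmem : (d.get? (m : Int)).isSome = true
      · rw [if_pos hmem]
        rw [if_pos (hdec.mp hmem)]
        exact ihC
      · rw [if_neg hmem]
        rw [if_neg (fun h => hmem (hdec.mpr h))]
        have hc : cnt = refGo [] (List.take m (ls.map String.toList)) 0 := ihC
        rw [hc]

theorem minGroup_eq_ref (ls : List String) :
    minGroup ls = refGo [] (ls.map String.toList) 0 := by
  unfold minGroup
  rw [PySem.List.pyRange_one]
  simp only [PySem.List.len_eq, Int.sub_zero, Int.toNat_natCast, Int.zero_add]
  have := (A_loop_inv ls ls.length (le_refl _)).2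
  rw [this]
  congr 1
  rw [List.take_of_length_le (by simp)]

-- ===== VERDICT (by name: the statement is the Claim_ definition above) =====
theorem minGroup_spec : Claim_equal_minGroup := by
  intro ls _
  show minGroup ls = minGroup_alt ls
  rw [minGroup_eq_ref, minGroup_alt_eq_ref]
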